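-- pv_equiv track=rewrite | github.com/sdfim/leetcode-solutions | binary-search/MEDIUM/maximize_win_from_two_segments.py | maximizeWin
-- ===== SOURCE A (Python) =====
-- from typing import List
--
-- def maximizeWin(prizePositions: List[int], k: int) -> int:
--     # dp[i] = max prizes we can collect with ONE segment ending at or before index i (in prizePositions)
--     # We need to choose 2 segments.
--     # Segment 2 ends at 'right'. Segment 1 ends before Segment 2 starts.
--
--     n = len(prizePositions)
--     dp = [0] * (n + 1)
--     ans = 0
--     left = 0
--
--     for right in range(n):
--         # Maintain window [left, right] such that positions[right] - positions[left] <= k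
--         while prizePositions[right] - prizePositions[left] > k:
--             left += 1
--
--         current_window_count = right - left + 1
--
--         # Best we can do with previous segment is dp[left-1] (using 1-based dp for convenience) or dp[left]
--         # dp[i] stores max for one segment using first i elements (0 to i-1)
--
--         # dp[left] corresponds to max prizes using elements 0...left-1
--         # Current segment uses left...right.
--         ans = max(ans, current_window_count + dp[left])
--
--         # Update dp[right+1]
--         dp[right+1] = max(dp[right], current_window_count)
--
--     return ans
-- ===== SOURCE B (Python) =====
-- from typing import List
--
-- def _lower_bound(a, x):
--     lo, hi = 0, len(a)
--     while lo < hi: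
--         mid = (lo + hi) // 2
--         if a[mid] < x:
--             lo = mid + 1
--         else:
--             hi = mid
--     return lo
--
-- def maximizeWin(prizePositions: List[int], k: int) -> int:
--     # Staged passes instead of A's single on-line dp scan:
--     # 1) find every window start by binary search, 2) window sizes,
--     # 3) prefix maxima of window sizes, 4) combine.
--     n = len(prizePositions)
--     lefts = [_lower_bound(prizePositions, prizePositions[i] - k) for i in range(n)]
--     counts = [i - lefts[i] + 1 for i in range(n)]
--     pm = []
--     best = 0
--     for c in counts:
--         best = max(best, c)
--         pm.append(best)
--     ans = 0
--     for i in range(n):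
--         prev = pm[lefts[i] - 1] if lefts[i] > 0 else 0
--         ans = max(ans, counts[i] + prev)
--     return ans
-- ===== Notes on version B (the rewrite author's own statement) =====
-- stated objective: alternative
-- what changed: Replaces A's single on-line scan (monotone two-pointer left boundary plus a dp array updated while scanning) with staged passes: binary-searched window starts, a window-size list, a prefix-max table built once, then a combining pass; Pre_ restricts to the natural domain (sorted positions, k >= 0) stated in the problem contract.
-- outside the precondition, e.g. on maximizeWin([0, 6, 8, 1], 1): A returns 3, B returns 4; on maximizeWin([1, 2], -1): A raises IndexError, B returns 0
import Mathlib
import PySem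

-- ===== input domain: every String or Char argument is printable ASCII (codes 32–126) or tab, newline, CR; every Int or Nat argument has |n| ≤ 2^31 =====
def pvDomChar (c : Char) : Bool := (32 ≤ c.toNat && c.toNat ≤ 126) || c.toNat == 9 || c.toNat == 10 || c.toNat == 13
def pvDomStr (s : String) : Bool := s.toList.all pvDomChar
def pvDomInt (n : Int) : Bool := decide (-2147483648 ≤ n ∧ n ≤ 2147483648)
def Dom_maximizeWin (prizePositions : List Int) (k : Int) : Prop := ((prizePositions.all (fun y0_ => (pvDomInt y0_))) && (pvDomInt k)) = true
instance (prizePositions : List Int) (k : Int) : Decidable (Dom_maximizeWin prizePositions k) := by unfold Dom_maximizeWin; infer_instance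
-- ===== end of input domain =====

-- B replaces A's single on-line two-pointer dp scan by staged passes: binary-searched
-- window starts, window sizes, a prefix-max table, then a combining pass (alternative
-- algorithm, similar cost); equivalence is proved on sorted input with k ≥ 0.


-- ===== PORT A =====
-- A's inner `while prizePositions[right]-prizePositions[left] > k: left += 1`;
-- fuel bounds the loop (on Pre_ inputs the loop stops strictly before fuel runs out,
-- since the left pointer never passes the current right index there).
def pvAdvanceLeft (a : List Int) (k : Int) (r left fuel : Nat) : Nat :=
  match fuel with
  | 0 => left
  | fuel' + 1 =>
    if a.getD r 0 - a.getD left 0 > k then pvAdvanceLeft a k r (left + 1) fuel' else left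

-- body of A's `for right in range(n)` loop; state = (dp, ans, left)
def pvStepA (a : List Int) (k : Int) (n : Nat) (st : List Int × Int × Nat) (r : Nat) :
    List Int × Int × Nat :=
  let left := pvAdvanceLeft a k r st.2.2 (n + 1)
  let cur : Int := (r : Int) - (left : Int) + 1
  let ans := max st.2.1 (cur + st.1.getD left 0)
  let dp := st.1.set (r + 1) (max (st.1.getD r 0) cur)
  (dp, ans, left)

def maximizeWin (prizePositions : List Int) (k : Int) : Int :=
  let n := prizePositions.length
  ((List.range n).foldl (pvStepA prizePositions k n)
    (List.replicate (n + 1) 0, (0 : Int), (0 : Nat))).2.1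

-- ===== PORT B =====
-- B's hand-written `_lower_bound` loop: `while lo < hi: mid=(lo+hi)//2; …`;
-- fuel bounds the loop (the interval shrinks each iteration, so fuel = n suffices).
def pvLowerBound (a : List Int) (x : Int) (lo hi fuel : Nat) : Nat :=
  match fuel with
  | 0 => lo
  | fuel' + 1 =>
    if lo < hi then
      let mid := (lo + hi) / 2
      if a.getD mid 0 < x then pvLowerBound a x (mid + 1) hi fuel'
      else pvLowerBound a x lo mid fuel'
    else lo

def maximizeWin_alt (prizePositions : List Int) (k : Int) : Int :=
  let n := prizePositions.length
  let lefts := (List.range n).map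
    (fun i => pvLowerBound prizePositions (prizePositions.getD i 0 - k) 0 n n)
  let counts := (List.range n).map (fun (i : Nat) => (i : Int) - (lefts.getD i 0 : Int) + 1)
  let pm := (counts.foldl
    (fun (st : List Int × Int) c =>
      let best := max st.2 c
      (st.1 ++ [best], best)) ([], 0)).1
  (List.range n).foldl
    (fun ans i =>
      let l := lefts.getD i 0
      let prev := if 0 < l then pm.getD (l - 1) 0 else 0
      max ans (counts.getD i 0 + prev)) 0

-- ===== PRECONDITION & SPEC =====
-- Pre_ admits the function's natural domain from the problem contract — prizePositions sorted
-- nondecreasing and k ≥ 0 — plus the degenerate cases where the order cannot matter (empty list,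
-- or every pairwise difference ≤ k so each window is the whole prefix). On other unsorted input
-- A still returns an accidental value of its two-pointer scan that B does not reproduce, and for
-- k < 0 on a nonempty list A raises IndexError (the left pointer runs off the end).
def Pre_maximizeWin (prizePositions : List Int) (k : Int) : Prop :=
  (0 ≤ k ∧ (List.Pairwise (· ≤ ·) prizePositions ∨
    ∀ x ∈ prizePositions, ∀ y ∈ prizePositions, x - y ≤ k)) ∨ prizePositions = []
instance (prizePositions : List Int) (k : Int) : Decidable (Pre_maximizeWin prizePositions k) := by
  unfold Pre_maximizeWin; infer_instance

def pvWitness_maximizeWin : List Int × Int := ([1, 1, 3, 5, 10], 2)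

def Spec_maximizeWin (prizePositions : List Int) (k : Int) (out : Int) : Prop := out = maximizeWin_alt prizePositions k
instance (prizePositions : List Int) (k : Int) (out : Int) : Decidable (Spec_maximizeWin prizePositions k out) := by unfold Spec_maximizeWin; infer_instance

-- ===== CLAIM (what is proved, stated in full; the proofs are below) =====
def Claim_equal_maximizeWin : Prop := ∀ (prizePositions : List Int) (k : Int), Dom_maximizeWin prizePositions k → Pre_maximizeWin prizePositions k → Spec_maximizeWin prizePositions k (maximizeWin prizePositions k)

-- ===== LEMMAS AND PROOFS =====

-- the common specification both ports are reduced to, relative to an abstract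
-- window-start function m : pvCnt = window size, pvPmax = prefix max of sizes,
-- pvAnsSpec = the answer after the first r iterations
def pvCnt (m : Nat → Nat) (r : Nat) : Int := (r : Int) - (m r : Int) + 1

def pvPmax (m : Nat → Nat) : Nat → Int
  | 0 => 0
  | j + 1 => max (pvPmax m j) (pvCnt m j)

def pvAnsSpec (m : Nat → Nat) : Nat → Int
  | 0 => 0
  | r + 1 => max (pvAnsSpec m r) (pvCnt m r + pvPmax m (m r))

theorem pv_sorted_getD {a : List Int} (hs : List.Pairwise (· ≤ ·) a) {i j : Nat}
    (hij : i ≤ j) (hj : j < a.length) : a.getD i 0 ≤ a.getD j 0 := by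
  rcases Nat.lt_or_ge i j with h | h
  · have hi : i < a.length := lt_trans h hj
    have := List.pairwise_iff_getElem.mp hs i j hi hj h
    rw [List.getD_eq_getElem _ _ hi, List.getD_eq_getElem _ _ hj]
    exact this
  · have : i = j := le_antisymm hij h
    subst this; exact le_refl _

theorem pv_getD_mem {a : List Int} {i : Nat} (hi : i < a.length) : a.getD i 0 ∈ a := by
  rw [List.getD_eq_getElem _ _ hi]
  exact List.getElem_mem hi

theorem pv_getD_map_range {α : Type} (f : Nat → α) (d : α) (n j : Nat) (h : j < n) :
    ((List.range n).map f).getD j d = f j := by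
  rw [List.getD_eq_getElem _ _ (by simpa using h)]
  simp

theorem pv_advance_eq (a : List Int) (k : Int) (r : Nat) {m : Nat}
    (hPm : a.getD r 0 - a.getD m 0 ≤ k)
    (hmin : ∀ j, j < m → k < a.getD r 0 - a.getD j 0)
    (fuel left : Nat) (h1 : left ≤ m) (h2 : m ≤ left + fuel) :
    pvAdvanceLeft a k r left fuel = m := by
  induction fuel generalizing left with
  | zero => simp only [pvAdvanceLeft]; omega
  | succ f ih =>
    unfold pvAdvanceLeft
    split_ifs with hc
    · have hlm : left < m := by
        rcases Nat.lt_or_ge left m with h | h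
        · exact h
        · have : left = m := by omega
          subst this; omega
      exact ih (left + 1) hlm (by omega)
    · have : ¬ left < m := fun hlt => absurd (hmin left hlt) (by omega)
      omega

theorem pv_bisect_eq (a : List Int) (k : Int) (r : Nat) {m : Nat}
    (hup : ∀ j, m ≤ j → j < a.length → a.getD r 0 - a.getD j 0 ≤ k)
    (_hPm : a.getD r 0 - a.getD m 0 ≤ k)
    (hmin : ∀ j, j < m → k < a.getD r 0 - a.getD j 0)
    (fuel lo hi : Nat) (h1 : lo ≤ m) (h2 : m ≤ hi) (h3 : hi ≤ a.length)
    (h4 : hi - lo ≤ fuel) :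
    pvLowerBound a (a.getD r 0 - k) lo hi fuel = m := by
  induction fuel generalizing lo hi with
  | zero => simp only [pvLowerBound]; omega
  | succ f ih =>
    unfold pvLowerBound
    by_cases hlh : lo < hi
    · simp only [hlh, if_true]
      have hmid1 : lo ≤ (lo + hi) / 2 := by omega
      have hmid2 : (lo + hi) / 2 < hi := by omega
      split_ifs with hlt
      · have hmlt : (lo + hi) / 2 < m := by
          by_contra h
          push Not at h
          have hle := hup _ h (lt_of_lt_of_le hmid2 h3)
          omega
        exact ih ((lo + hi) / 2 + 1) hi hmlt h2 h3 (by omega)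
      · have hmle : m ≤ (lo + hi) / 2 := by
          by_contra h
          push Not at h
          have := hmin _ h
          omega
        exact ih lo ((lo + hi) / 2) h1 hmle (le_trans (le_of_lt hmid2) h3) (by omega)
    · simp only [hlh, if_false]; omega

-- the invariant of A's fold, relative to the abstract window-start function m
theorem pv_invA (a : List Int) (k : Int) (m : Nat → Nat)
    (hPm : ∀ r, r < a.length → a.getD r 0 - a.getD (m r) 0 ≤ k)
    (hmin : ∀ r j, j < m r → k < a.getD r 0 - a.getD j 0)
    (hmr : ∀ r, r < a.length → m r ≤ r)
    (hstep : ∀ r j, r + 1 < a.length → j < a.length →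
      k < a.getD r 0 - a.getD j 0 → k < a.getD (r + 1) 0 - a.getD j 0)
    (r : Nat) (hr : r ≤ a.length) :
    (((List.range r).foldl (pvStepA a k a.length)
        (List.replicate (a.length + 1) 0, (0 : Int), (0 : Nat))).2.1 = pvAnsSpec m r)
    ∧ (((List.range r).foldl (pvStepA a k a.length)
        (List.replicate (a.length + 1) 0, (0 : Int), (0 : Nat))).1
       = (List.range (r + 1)).map (pvPmax m) ++ List.replicate (a.length - r) 0)
    ∧ (∀ j, j < ((List.range r).foldl (pvStepA a k a.length)
        (List.replicate (a.length + 1) 0, (0 : Int), (0 : Nat))).2.2 →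
        r < a.length → k < a.getD r 0 - a.getD j 0) := by
  induction r with
  | zero =>
    refine ⟨rfl, ?_, ?_⟩
    · simp [List.replicate_succ, pvPmax, List.range_succ]
    · intro j hj _; simp at hj
  | succ r ih =>
    have hrn : r < a.length := by omega
    obtain ⟨ihAns, ihDp, ihLeft⟩ := ih (by omega)
    set sA := ((List.range r).foldl (pvStepA a k a.length)
        (List.replicate (a.length + 1) 0, (0 : Int), (0 : Nat))) with hsA
    have hleft : sA.2.2 ≤ m r := by
      by_contra h
      push Not at h
      have hP := hPm r hrn
      exact absurd (ihLeft (m r) h hrn) (by omega)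
    have hadv : pvAdvanceLeft a k r sA.2.2 (a.length + 1) = m r :=
      pv_advance_eq a k r (hPm r hrn) (hmin r) (a.length + 1) sA.2.2 hleft
        (by have := hmr r hrn; omega)
    have hmrr := hmr r hrn
    have hgetm : sA.1.getD (m r) 0 = pvPmax m (m r) := by
      rw [ihDp, List.getD_append _ _ _ _ (by simp; omega),
        pv_getD_map_range _ _ _ _ (by omega)]
    have hgetr : sA.1.getD r 0 = pvPmax m r := by
      rw [ihDp, List.getD_append _ _ _ _ (by simp), pv_getD_map_range _ _ _ _ (by omega)]
    rw [List.range_succ, List.foldl_append]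
    simp only [List.foldl_cons, List.foldl_nil, pvStepA]
    simp only [← hsA, hadv]
    refine ⟨?_, ?_, ?_⟩
    · rw [ihAns, hgetm]; rfl
    · rw [hgetr, ihDp]
      have hrepl : List.replicate (a.length - r) (0 : Int)
          = 0 :: List.replicate (a.length - (r + 1)) 0 := by
        have h' : a.length - r = (a.length - (r + 1)) + 1 := by omega
        rw [h', List.replicate_succ]
      rw [hrepl, List.set_append]
      have hlen : ¬ (r + 1) < ((List.range (r + 1)).map (pvPmax m)).length := by simp
      rw [if_neg hlen]
      have h0 : r + 1 - ((List.range (r + 1)).map (pvPmax m)).length = 0 := by simp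
      rw [h0, List.set_cons_zero]
      have : max (pvPmax m r) ((r : Int) - (m r : Int) + 1) = pvPmax m (r + 1) := by
        simp [pvPmax, pvCnt]
      rw [this]
      rw [show List.range (r + 1 + 1) = List.range (r + 1) ++ [r + 1] from List.range_succ,
        List.map_append]
      simp
    · intro j hj hr1
      exact hstep r j hr1 (by omega) (hmin r j hj)

theorem pv_foldl_congr {α β : Type} {l : List β} {f g : α → β → α} {init : α}
    (h : ∀ acc x, x ∈ l → f acc x = g acc x) : l.foldl f init = l.foldl g init := by
  induction l generalizing init with
  | nil => rfl
  | cons x t ih =>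
    simp only [List.foldl_cons]
    rw [h init x (by simp)]
    exact ih (fun acc y hy => h acc y (by simp [hy]))

theorem pv_pm_fold (m : Nat → Nat) (n : Nat) :
    (((List.range n).map (pvCnt m)).foldl
      (fun (st : List Int × Int) c =>
        let best := max st.2 c
        (st.1 ++ [best], best)) ([], 0))
    = ((List.range n).map (fun j => pvPmax m (j + 1)), pvPmax m n) := by
  induction n with
  | zero => rfl
  | succ n ih =>
    rw [List.range_succ, List.map_append, List.foldl_append, ih]
    simp only [List.map_cons, List.map_nil, List.foldl_cons, List.foldl_nil]
    simp [pvPmax]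

theorem pv_ans_fold (m : Nat → Nat) (n : Nat) :
    (List.range n).foldl (fun ans i => max ans (pvCnt m i + pvPmax m (m i))) 0
      = pvAnsSpec m n := by
  induction n with
  | zero => rfl
  | succ n ih =>
    rw [List.range_succ, List.foldl_append, ih]
    simp [pvAnsSpec]

-- B's staged passes compute the same specification
theorem pv_B_eq (a : List Int) (k : Int) (m : Nat → Nat)
    (hbis : ∀ r, r < a.length →
      pvLowerBound a (a.getD r 0 - k) 0 a.length a.length = m r)
    (hmr : ∀ r, r < a.length → m r ≤ r) :
    maximizeWin_alt a k = pvAnsSpec m a.length := by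
  simp only [maximizeWin_alt]
  have hlefts : (List.range a.length).map
      (fun i => pvLowerBound a (a.getD i 0 - k) 0 a.length a.length)
      = (List.range a.length).map m := by
    apply List.map_congr_left
    intro i hi
    exact hbis i (List.mem_range.mp hi)
  rw [hlefts]
  have hcounts : (List.range a.length).map
      (fun (i : Nat) => (i : Int) - ((((List.range a.length).map m).getD i 0 : Nat) : Int) + 1)
      = (List.range a.length).map (pvCnt m) := by
    apply List.map_congr_left
    intro i hi
    rw [pv_getD_map_range _ _ _ _ (List.mem_range.mp hi)]
    rfl
  rw [hcounts, pv_pm_fold]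
  rw [← pv_ans_fold m a.length]
  apply pv_foldl_congr
  intro ans i hi
  have hin : i < a.length := List.mem_range.mp hi
  rw [pv_getD_map_range _ _ _ _ hin, pv_getD_map_range _ _ _ _ hin]
  by_cases h0 : 0 < m i
  · rw [if_pos h0, pv_getD_map_range _ _ _ _ (by have := hmr i hin; omega)]
    have : m i - 1 + 1 = m i := by omega
    rw [this]
  · rw [if_neg h0]
    have : m i = 0 := by omega
    rw [this]
    rfl

-- ===== VERDICT (by name: the statement is the Claim_ definition above) =====
theorem maximizeWin_spec : Claim_equal_maximizeWin := by
  intro a k _ hpre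
  rcases hpre with ⟨hk, hcase⟩ | hnil
  · -- the least window start exists for every r because a[r] - a[r] = 0 ≤ k
    have hex : ∀ r : Nat, ∃ i, a.getD r 0 - a.getD i 0 ≤ k := by
      intro r; exact ⟨r, by simpa using hk⟩
    set m : Nat → Nat := fun r => Nat.find (hex r) with hm
    have hPm : ∀ r, a.getD r 0 - a.getD (m r) 0 ≤ k := fun r => Nat.find_spec (hex r)
    have hmin : ∀ r j, j < m r → k < a.getD r 0 - a.getD j 0 := by
      intro r j hj
      have := Nat.find_min (hex r) hj
      omega
    have hmr : ∀ r, m r ≤ r := fun r => Nat.find_min' (hex r) (by simpa using hk)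
    have main : ∀ (hup : ∀ r j j', r < a.length → j' < a.length → j ≤ j' →
        a.getD r 0 - a.getD j 0 ≤ k → a.getD r 0 - a.getD j' 0 ≤ k)
        (hstep : ∀ r j, r + 1 < a.length → j < a.length →
          k < a.getD r 0 - a.getD j 0 → k < a.getD (r + 1) 0 - a.getD j 0),
        Spec_maximizeWin a k (maximizeWin a k) := by
      intro hup hstep
      have hA := pv_invA a k m (fun r _ => hPm r) hmin (fun r _ => hmr r) hstep
        a.length (le_refl _)
      have hbis : ∀ r, r < a.length →
          pvLowerBound a (a.getD r 0 - k) 0 a.length a.length = m r := by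
        intro r hrn
        exact pv_bisect_eq a k r
          (fun j hmj hjn => hup r (m r) j hrn hjn hmj (hPm r))
          (hPm r) (hmin r) a.length 0 a.length (Nat.zero_le _)
          (le_trans (hmr r) (le_of_lt hrn)) (le_refl _) (by omega)
      unfold Spec_maximizeWin maximizeWin
      rw [pv_B_eq a k m hbis (fun r _ => hmr r)]
      exact hA.1
    rcases hcase with hs | hsp
    · refine main ?_ ?_
      · intro r j j' _ hj' hjj' hP
        have := pv_sorted_getD hs hjj' hj'
        omega
      · intro r j hr1 _ hlt
        have h2 : a.getD r 0 ≤ a.getD (r + 1) 0 := pv_sorted_getD hs (by omega) hr1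
        omega
    · refine main ?_ ?_
      · intro r j j' hr hj' _ _
        exact hsp _ (pv_getD_mem hr) _ (pv_getD_mem hj')
      · intro r j hr1 hj hlt
        have h1 : a.getD r 0 - a.getD j 0 ≤ k :=
          hsp _ (pv_getD_mem (show r < a.length by omega)) _ (pv_getD_mem hj)
        omega
  · subst hnil
    rfl
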